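-- pv_equiv track=rewrite | github.com/Gan-Tu/python-print-tree | main.py | add_connectors
-- ===== SOURCE A (Python) =====
-- def add_connectors(lst):
--   if len(lst) == 1:
--     return lst
--   startingFanIndex = None
--   endingFanIndex = None
--   for i in range(0, len(lst)):
--     # if we haven't seen an non empty element yet, only add space
--     if lst[i].startswith(" ") and startingFanIndex is None:
--       continue
--     # mark that we just found the first line that doesn't start with indentation
--     if startingFanIndex is None:
--       startingFanIndex = i
--     # update this index as the index of the latest label
--     if not lst[i].startswith(" "):
--       endingFanIndex = i
--   # prepend connectors
--   if startingFanIndex == endingFanIndex: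
--     return lst
--   for i in range(len(lst)):
--     if i == startingFanIndex:
--       lst[i] = f"┌{lst[i]}"
--     elif i == endingFanIndex:
--       lst[i] = f"└{lst[i]}"
--     elif i > startingFanIndex and i < endingFanIndex:
--       if lst[i].startswith(" "):
--         lst[i] = f"│{lst[i]}"
--       else:
--         lst[i] = f"├{lst[i]}"
--     else:
--       lst[i] = f" {lst[i]}"
--   return lst
-- ===== SOURCE B (Python) =====
-- def add_connectors(lst):
--   # Count-based single pass: no first/last label indices are ever computed; each
--   # element's connector is chosen from the running number of labels already seen
--   # and the number of labels still ahead. Mutates lst in place like the original.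
--   total = sum(1 for s in lst if not s.startswith(" "))
--   if total < 2:
--     return lst
--   seen = 0
--   for i, s in enumerate(lst):
--     label = not s.startswith(" ")
--     ahead = total - seen - label
--     if label and seen == 0:
--       ch = "\u250c"
--     elif label and ahead == 0:
--       ch = "\u2514"
--     elif seen and ahead:
--       ch = "\u251c" if label else "\u2502"
--     else:
--       ch = " "
--     lst[i] = ch + s
--     seen += label
--   return lst
-- ===== Notes on version B (the rewrite author's own statement) =====
-- stated objective: alternative
-- what changed: Replaces A's computation of first/last label indices (stateful scan) followed by an index-position-branching rewrite loop with a count-based scheme: one count of labels, then a single pass keeping a running 'labels seen' counter and deriving each connector from seen/ahead label counts, never computing any index.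
import Mathlib
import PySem

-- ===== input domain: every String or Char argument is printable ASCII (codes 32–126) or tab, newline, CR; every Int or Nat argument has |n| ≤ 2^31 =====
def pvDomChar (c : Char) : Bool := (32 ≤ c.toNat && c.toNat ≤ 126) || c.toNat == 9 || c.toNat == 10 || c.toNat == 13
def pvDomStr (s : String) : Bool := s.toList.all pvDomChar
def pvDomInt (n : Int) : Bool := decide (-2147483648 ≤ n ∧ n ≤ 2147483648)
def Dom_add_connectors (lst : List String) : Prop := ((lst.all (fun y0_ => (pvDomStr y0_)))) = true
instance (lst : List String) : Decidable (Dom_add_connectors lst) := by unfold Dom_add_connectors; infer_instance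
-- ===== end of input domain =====

-- B replaces A's first/last-label indices and index-position branching by a count-based
-- single pass (running 'labels seen' counter, connectors chosen from seen/ahead counts);
-- both mutate the Python list in place, equivalence is about the returned value.

-- ===== PORT A =====
-- one iteration of A's first loop: state = (startingFanIndex, endingFanIndex)
def acStep (lst : List String) (st : Option Int × Option Int) (i : Int) : Option Int × Option Int :=
  if PySem.Str.startswith (PySem.List.pyGetD lst i "") " " && st.1.isNone then st
  else
    let s := if st.1.isNone then some i else st.1
    let e := if !PySem.Str.startswith (PySem.List.pyGetD lst i "") " " then some i else st.2
    (s, e)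

def add_connectors (lst : List String) : List String :=
  if lst.length == 1 then lst
  else
    let p := (PySem.List.pyRange 0 (lst.length : Int) 1).foldl (acStep lst) (none, none)
    if p.1 = p.2 then lst
    else
      match p.1, p.2 with
      | some s, some e =>
          -- second loop writes each lst[i] once from its old value: mapIdx
          lst.mapIdx (fun i x =>
            if (i : Int) = s then "┌" ++ x
            else if (i : Int) = e then "└" ++ x
            else if s < (i : Int) ∧ (i : Int) < e then
              (if PySem.Str.startswith x " " then "│" ++ x else "├" ++ x)
            else " " ++ x)
      | _, _ => lst   -- unreachable (in Python an int/None comparison would raise; this state never occurs)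

-- ===== PORT B =====
-- the connector the loop body of Source B picks for one element
def acCh (total seen : Nat) (s : String) : String :=
  let label := !PySem.Str.startswith s " "
  let b := if label then 1 else 0
  let ahead := total - seen - b
  if label && seen == 0 then "┌"
  else if label && ahead == 0 then "└"
  else if seen != 0 && ahead != 0 then (if label then "├" else "│")
  else " "

-- Source B's single pass with the running 'seen' counter
def acGo (total : Nat) : Nat → List String → List String
  | _, [] => []
  | seen, s :: rest =>
      (acCh total seen s ++ s) ::
        acGo total (seen + (if !PySem.Str.startswith s " " then 1 else 0)) rest

def add_connectors_alt (lst : List String) : List String :=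
  let total := lst.countP (fun s => !PySem.Str.startswith s " ")
  if total < 2 then lst else acGo total 0 lst

-- ===== PRECONDITION & SPEC =====
def Spec_add_connectors (lst : List String) (out : List String) : Prop := out = add_connectors_alt lst
instance (lst : List String) (out : List String) : Decidable (Spec_add_connectors lst out) := by unfold Spec_add_connectors; infer_instance

-- ===== CLAIM (what is proved, stated in full; the proofs are below) =====
def Claim_equal_add_connectors : Prop := ∀ (lst : List String), Dom_add_connectors lst → Spec_add_connectors lst (add_connectors lst)

-- ===== LEMMAS AND PROOFS =====

-- the index list of un-indented labels seen by A's first loop, and the label count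
def acIdx (lst : List String) (k : Nat) : List Nat :=
  (List.range k).filter (fun j => !PySem.Str.startswith (lst.getD j "") " ")

def acIdxI (lst : List String) (k : Nat) : List Int :=
  (acIdx lst k).map (fun j => Int.ofNat j)

def cntL (lst : List String) (k : Nat) : Nat := (acIdx lst k).length

theorem acIdx_mem {lst : List String} {k j : Nat} :
    j ∈ acIdx lst k ↔ j < k ∧ !PySem.Str.startswith (lst.getD j "") " " := by
  simp [acIdx]

theorem acIdx_pairwise (lst : List String) (k : Nat) : (acIdx lst k).Pairwise (· < ·) :=
  List.Pairwise.sublist List.filter_sublist List.pairwise_lt_range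

theorem cntL_succ (lst : List String) (k : Nat) :
    cntL lst (k + 1) = cntL lst k + (if !PySem.Str.startswith (lst.getD k "") " " then 1 else 0) := by
  unfold cntL acIdx
  rw [List.range_succ, List.filter_append, List.filter_cons]
  split <;> simp

theorem cntL_mono (lst : List String) {m n : Nat} (h : m ≤ n) : cntL lst m ≤ cntL lst n := by
  induction n, h using Nat.le_induction with
  | base => exact le_rfl
  | succ n hn ih => rw [cntL_succ]; omega

theorem cntL_eq_iff (lst : List String) {m n : Nat} (h : m ≤ n) :
    cntL lst n = cntL lst m ↔
      ∀ j, m ≤ j → j < n → (!PySem.Str.startswith (lst.getD j "") " ") = false := by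
  induction n, h using Nat.le_induction with
  | base => simp; omega
  | succ n hn ih =>
    rw [cntL_succ]
    have h1 := cntL_mono lst hn
    constructor
    · intro he j hj1 hj2
      have hb : (!PySem.Str.startswith (lst.getD n "") " ") = false := by
        by_contra hb
        simp only [Bool.not_eq_false] at hb
        rw [if_pos hb] at he
        omega
      rcases Nat.lt_or_ge j n with hlt | hge
      · refine (ih.mp ?_) j hj1 hlt
        rw [hb] at he; omega
      · have : j = n := by omega
        subst this; exact hb
    · intro hall
      have hb := hall n hn (by omega)
      rw [hb]
      simp only [Bool.false_eq_true, if_false, Nat.add_zero]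
      exact ih.mpr (fun j h1 h2 => hall j h1 (by omega))

theorem take_countP (lst : List String) : ∀ i, i ≤ lst.length →
    (lst.take i).countP (fun s => !PySem.Str.startswith s " ") = cntL lst i := by
  intro i
  induction i with
  | zero => intro _; simp [cntL, acIdx]
  | succ i ih =>
    intro h
    have hi : i < lst.length := by omega
    rw [List.take_succ, List.countP_append, ih (by omega), cntL_succ]
    have hg : lst[i]? = some lst[i] := List.getElem?_eq_getElem hi
    have hd : lst.getD i "" = lst[i] := by simp [List.getD, hg]
    rw [hg, hd]
    simp [List.countP_cons]

theorem acStep_indent (lst : List String) (i : Int) (st : Option Int × Option Int)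
    (h : PySem.Str.startswith (PySem.List.pyGetD lst i "") " " = true) :
    acStep lst st i = st := by
  unfold acStep
  simp only [PySem.Str.startswith_eq] at h
  rcases st with ⟨s1, s2⟩
  rcases s1 with _ | v <;> simp_all

theorem acStep_label (lst : List String) (i : Int) (st : Option Int × Option Int)
    (h : PySem.Str.startswith (PySem.List.pyGetD lst i "") " " = false) :
    acStep lst st i = (if st.1.isNone then some i else st.1, some i) := by
  unfold acStep
  simp only [PySem.Str.startswith_eq] at h
  rcases st with ⟨s1, s2⟩
  rcases s1 with _ | v <;> simp_all

theorem acIdxI_succ_indent (lst : List String) (k : Nat)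
    (h : PySem.Chars.startswith (lst[k]?.getD "").toList [' '] = true) :
    acIdxI lst (k + 1) = acIdxI lst k := by
  unfold acIdxI acIdx
  rw [List.range_succ, List.filter_append, List.filter_cons]
  simp [h]

theorem acIdxI_succ_label (lst : List String) (k : Nat)
    (h : ¬ PySem.Chars.startswith (lst[k]?.getD "").toList [' '] = true) :
    acIdxI lst (k + 1) = acIdxI lst k ++ [(k : Int)] := by
  unfold acIdxI acIdx
  rw [List.range_succ, List.filter_append, List.filter_cons]
  simp [h]

theorem acLoop (lst : List String) (k : Nat) (hk : k ≤ lst.length) :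
    (PySem.List.pyRange 0 (k : Int) 1).foldl (acStep lst) (none, none)
      = ((acIdxI lst k).head?, (acIdxI lst k).getLast?) := by
  induction k with
  | zero => simp [PySem.List.pyRange_one_eq_nil, acIdxI, acIdx]
  | succ k ih =>
    have hk' : k ≤ lst.length := Nat.le_of_succ_le hk
    have hr : PySem.List.pyRange 0 ((k + 1 : Nat) : Int) 1
        = PySem.List.pyRange 0 (k : Int) 1 ++ [(k : Int)] := by
      push_cast
      exact PySem.List.pyRange_one_succ_right (by positivity)
    have hget : PySem.List.pyGetD lst (k : Int) "" = lst.getD k "" := by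
      simp [PySem.List.pyGetD_natCast]
    rw [hr, List.foldl_append, ih hk', List.foldl_cons, List.foldl_nil]
    by_cases hq : PySem.Chars.startswith (lst[k]?.getD "").toList [' '] = true
    · rw [acStep_indent lst (k : Int) _ (by simp [hget, hq]), acIdxI_succ_indent lst k hq]
    · rw [acStep_label lst (k : Int) _ (by simp [hget, hq]), acIdxI_succ_label lst k hq]
      rcases hh : (acIdxI lst k).head? with _ | v <;>
        simp [hh, List.head?_append, List.getLast?_append]

theorem acGo_eq_mapIdx (total : Nat) :
    ∀ (xs : List String) (c : Nat),
      acGo total c xs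
        = xs.mapIdx (fun i x =>
            acCh total (c + (xs.take i).countP (fun s => !PySem.Str.startswith s " ")) x ++ x) := by
  intro xs
  induction xs with
  | nil => intro c; simp [acGo]
  | cons x rest ih =>
    intro c
    rw [acGo, ih, List.mapIdx_cons]
    refine congrArg₂ List.cons (by simp) ?_
    congr 1
    funext i y
    congr 2
    simp only [PySem.Str.startswith_eq, List.take_succ_cons, List.countP_cons, Bool.not_eq_true']
    split_ifs <;> omega

theorem pw_le_getLast : ∀ (l : List Nat) (h : l ≠ []) (x : Nat),
    l.Pairwise (· < ·) → x ∈ l → x ≤ l.getLast h := by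
  intro l
  induction l with
  | nil => intro h; exact absurd rfl h
  | cons y t ih =>
    intro h x hpw hx
    rcases t with _ | ⟨z, t'⟩
    · simp at hx; simp [hx]
    · rw [List.getLast_cons (by simp)]
      rcases List.mem_cons.mp hx with rfl | hx'
      · have := (List.pairwise_cons.mp hpw).1 _ (List.getLast_mem (l := z :: t') (by simp))
        omega
      · exact ih (by simp) x (List.pairwise_cons.mp hpw).2 hx'

-- ===== VERDICT (by name: the statement is the Claim_ definition above) =====
theorem add_connectors_spec : Claim_equal_add_connectors := by
  unfold Claim_equal_add_connectors
  intro lst _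
  unfold Spec_add_connectors add_connectors add_connectors_alt
  rw [acLoop lst lst.length le_rfl]
  have htot : lst.countP (fun s => !PySem.Str.startswith s " ") = cntL lst lst.length := by
    simpa using take_countP lst lst.length le_rfl
  rw [htot]
  rcases hK : acIdx lst lst.length with _ | ⟨a, K0⟩
  · have hM : acIdxI lst lst.length = [] := by unfold acIdxI; rw [hK]; rfl
    have hc : cntL lst lst.length = 0 := by unfold cntL; rw [hK]; rfl
    rw [hM, hc]
    simp
  · rcases K0 with _ | ⟨b, K1⟩
    · have hM : acIdxI lst lst.length = [(a : Int)] := by unfold acIdxI; rw [hK]; rfl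
      have hc : cntL lst lst.length = 1 := by unfold cntL; rw [hK]; rfl
      rw [hM, hc]
      simp
    · -- at least two labels
      have hpw : (a :: b :: K1).Pairwise (· < ·) := hK ▸ acIdx_pairwise lst lst.length
      have hne : (a :: b :: K1) ≠ [] := by simp
      set e := (a :: b :: K1).getLast hne with hedef
      have heK : e ∈ a :: b :: K1 := hedef ▸ List.getLast_mem hne
      have hae : a < e := by
        have hmem : e ∈ b :: K1 := by
          rw [hedef, List.getLast_cons (by simp)]
          exact List.getLast_mem _
        exact (List.pairwise_cons.mp hpw).1 e hmem
      have hmemK : ∀ j, j ∈ a :: b :: K1 ↔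
          j < lst.length ∧ (!PySem.Str.startswith (lst.getD j "") " ") = true := by
        intro j
        rw [← hK]
        exact acIdx_mem
      have hen : e < lst.length := ((hmemK e).mp heK).1
      have hpe : (!PySem.Str.startswith (lst.getD e "") " ") = true := ((hmemK e).mp heK).2
      have hpa : (!PySem.Str.startswith (lst.getD a "") " ") = true :=
        ((hmemK a).mp (by simp)).2
      have ha : a < lst.length := ((hmemK a).mp (by simp)).1
      have amin : ∀ j, j < lst.length → (!PySem.Str.startswith (lst.getD j "") " ") = true → a ≤ j := by
        intro j h1 h2
        rcases List.mem_cons.mp ((hmemK j).mpr ⟨h1, h2⟩) with rfl | hj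
        · exact le_rfl
        · exact le_of_lt ((List.pairwise_cons.mp hpw).1 j hj)
      have emax : ∀ j, j < lst.length → (!PySem.Str.startswith (lst.getD j "") " ") = true → j ≤ e := by
        intro j h1 h2
        exact pw_le_getLast _ hne j hpw ((hmemK j).mpr ⟨h1, h2⟩)
      -- count facts
      have c0 : ∀ i, i ≤ a → cntL lst i = 0 := by
        intro i hi
        have h0 : cntL lst 0 = 0 := rfl
        have := (cntL_eq_iff lst (Nat.zero_le i)).mpr (fun j h1 h2 => by
          cases hq : (!PySem.Str.startswith (lst.getD j "") " ") with
          | false => rfl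
          | true => exact absurd (amin j (by omega) hq) (by omega))
        omega
      have ca1 : cntL lst (a + 1) = 1 := by
        rw [cntL_succ, hpa, c0 a le_rfl]
        simp
      have cpos : ∀ i, a < i → 1 ≤ cntL lst i := by
        intro i hi
        have := cntL_mono lst (show a + 1 ≤ i by omega)
        omega
      have ce1 : cntL lst (e + 1) = cntL lst e + 1 := by
        rw [cntL_succ, hpe]
        simp
      have ctop : cntL lst lst.length = cntL lst (e + 1) :=
        (cntL_eq_iff lst (show e + 1 ≤ lst.length by omega)).mpr (fun j h1 h2 => by
          cases hq : (!PySem.Str.startswith (lst.getD j "") " ") with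
          | false => rfl
          | true => exact absurd (emax j (by omega) hq) (by omega))
      set T := cntL lst lst.length with hTdef
      have hT2 : 2 ≤ T := by
        have h1 := cntL_mono lst (show e + 1 ≤ lst.length by omega)
        have h2 := cntL_mono lst (show a + 1 ≤ e by omega)
        omega
      -- reduce A's branches
      have hhead : (acIdxI lst lst.length).head? = some (a : Int) := by
        unfold acIdxI; rw [hK]; rfl
      have hlast : (acIdxI lst lst.length).getLast? = some (e : Int) := by
        unfold acIdxI
        rw [hK, List.getLast?_map, List.getLast?_eq_some_getLast hne, hedef]
        rfl
      rw [hhead, hlast]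
      have h1f : (lst.length == 1) = false := by
        simp only [beq_eq_false_iff_ne, ne_eq]
        omega
      rw [h1f]
      simp only [Bool.false_eq_true, if_false]
      rw [if_neg (by simp; omega)]
      rw [if_neg (by omega)]
      rw [acGo_eq_mapIdx]
      -- elementwise comparison
      apply List.ext_getElem (by simp)
      intro i hi1 hi2
      simp only [List.getElem_mapIdx]
      rw [take_countP lst i (by simp at hi1; omega)]
      have hi : i < lst.length := by simpa using hi1
      have hgd : lst.getD i "" = lst[i] := by
        simp [List.getD, List.getElem?_eq_getElem hi]
      unfold acCh
      simp only [← hgd]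
      set L := (!PySem.Str.startswith (lst.getD i "") " ") with hLdef
      have hbi : cntL lst (i + 1) = cntL lst i + (if L then 1 else 0) := by
        rw [cntL_succ]
      rcases Nat.lt_trichotomy i a with hia | hia | hia
      · -- i < a : blank on both sides
        have hL : L = false := by
          cases hq : (!PySem.Str.startswith (lst.getD i "") " ") with
          | false => rw [hLdef, hq]
          | true => exact absurd (amin i hi hq) (by omega)
        have hc : cntL lst i = 0 := c0 i (by omega)
        rw [if_neg (by omega), if_neg (by omega), if_neg (by omega)]
        simp [hL, hc]
      · -- i = a : fan start
        subst hia
        rw [if_pos rfl]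
        have hLt : L = true := by rw [hLdef]; exact hpa
        simp [hLt, c0 i le_rfl]
      · rcases Nat.lt_trichotomy i e with hie | hie | hie
        · -- a < i < e : interior
          have hpre : cntL lst i ≠ 0 := by have := cpos i hia; omega
          have h1 : cntL lst (i + 1) ≤ cntL lst e := cntL_mono lst (by omega)
          have h2 : cntL lst (e + 1) ≤ T := by rw [hTdef]; exact cntL_mono lst (by omega)
          rw [if_neg (by omega), if_neg (by omega), if_pos ⟨by omega, by omega⟩]
          cases hL : L with
          | false =>
            have hs : PySem.Chars.startswith (lst[i]?.getD "").toList [' '] = true := by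
              have h := hLdef.symm.trans hL
              simpa [List.getD] using h
            have hbi' : cntL lst (i + 1) = cntL lst i := by rw [hbi, hL]; simp
            have hah : T - cntL lst i ≠ 0 := by omega
            simp [hs, hpre, hah]
          | true =>
            have hs : PySem.Chars.startswith (lst[i]?.getD "").toList [' '] = false := by
              have h := hLdef.symm.trans hL
              simpa [List.getD] using h
            have hbi' : cntL lst (i + 1) = cntL lst i + 1 := by rw [hbi, hL]; simp
            have hah : T - cntL lst i - 1 ≠ 0 := by omega
            simp [hs, hpre, hah]
        · -- i = e : fan end
          have hLt : L = true := by rw [hLdef, hie]; exact hpe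
          have hc0 : cntL lst i ≠ 0 := by have := cpos i hia; omega
          have hahead : T - cntL lst i - 1 = 0 := by
            have h1 : cntL lst (i + 1) = cntL lst i + 1 := by rw [hbi, hLt]; simp
            have h2 : T = cntL lst (i + 1) := by rw [hie]; exact ctop
            omega
          rw [if_neg (by omega), if_pos (by omega)]
          simp [hLt, hc0, hahead]
        · -- i > e : blank
          have hL : L = false := by
            cases hq : (!PySem.Str.startswith (lst.getD i "") " ") with
            | false => rw [hLdef, hq]
            | true => exact absurd (emax i hi hq) (by omega)
          have hest : cntL lst (e + 1) ≤ cntL lst i := cntL_mono lst (by omega)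
          have hler : cntL lst i ≤ T := by rw [hTdef]; exact cntL_mono lst (by omega)
          have hahead : T - cntL lst i = 0 := by
            have hT : T = cntL lst (e + 1) := ctop
            omega
          rw [if_neg (by omega), if_neg (by omega), if_neg (by omega)]
          simp [hL, hahead]
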